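-- pv_equiv track=rewrite | github.com/Gravitar64/A-beautiful-code-in-Python | Teil_xx_bwinf_41_a3.py | mut_blockspalte
-- ===== SOURCE A (Python) =====
-- def mut_blockspalte(s, p):
--   s1 = s.copy()
--   for bsp_von, bsp_zu in enumerate(p):
--     if bsp_von == bsp_zu:
--       continue
--     for i in range(27):
--       s1[i // 3 * 9 + i % 3 + (bsp_zu * 3)] = s[i //
--                                                 3 * 9 + i % 3 + (bsp_von * 3)]
--   return s1
-- ===== SOURCE B (Python) =====
-- def mut_blockspalte(s, p):
--   srccol = list(range(9))
--   for von, zu in enumerate(p):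
--     if von != zu:
--       for j in range(3):
--         srccol[zu * 3 + j] = von * 3 + j
--   if srccol == list(range(9)):      # no block column moves: board unchanged
--     return s.copy()
--   return [s[r * 9 + srccol[c]] for r in range(9) for c in range(9)]
-- ===== Notes on version B (the rewrite author's own statement) =====
-- stated objective: alternative
-- what changed: B builds a 9-entry source-column index table once and emits the whole board in a single uniform comprehension pass over rows and columns, instead of A's per-mapping 27-cell block copies into a mutated copy of the board.
import Mathlib
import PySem

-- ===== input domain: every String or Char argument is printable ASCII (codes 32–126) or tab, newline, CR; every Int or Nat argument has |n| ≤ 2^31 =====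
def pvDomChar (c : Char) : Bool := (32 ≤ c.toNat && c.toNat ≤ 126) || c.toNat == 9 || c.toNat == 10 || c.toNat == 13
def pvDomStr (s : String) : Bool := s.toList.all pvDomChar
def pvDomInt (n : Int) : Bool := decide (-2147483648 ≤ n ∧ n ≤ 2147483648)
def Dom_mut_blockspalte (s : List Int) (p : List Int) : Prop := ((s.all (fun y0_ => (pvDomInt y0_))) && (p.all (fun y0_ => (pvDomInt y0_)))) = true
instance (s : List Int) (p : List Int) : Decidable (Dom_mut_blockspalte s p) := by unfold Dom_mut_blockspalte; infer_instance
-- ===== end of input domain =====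

-- B replaces A's repeated 27-cell block copies into a mutated board copy with a 9-entry source-column
-- table plus one uniform output pass (no mutation of the input); alternative decomposition, same cost.

-- ===== PORT A =====
-- literal transliteration of A: s1 = s.copy(); for (von, zu) in enumerate(p): if von == zu: continue;
-- for i in range(27): s1[i//3*9 + i%3 + zu*3] = s[i//3*9 + i%3 + von*3].  Under Pre_ every index is in
-- range, so the total pySetD/pyGetD forms are exact there.
def mut_blockspalte (s : List Int) (p : List Int) : List Int :=
  (PySem.List.enumerate p).foldl (fun s1 bz =>
    if bz.1 == bz.2 then s1
    else
      (PySem.List.pyRange 0 27 1).foldl (fun s1 i =>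
        PySem.List.pySetD s1 (PySem.Int.floordiv i 3 * 9 + PySem.Int.mod i 3 + bz.2 * 3)
          (PySem.List.pyGetD s (PySem.Int.floordiv i 3 * 9 + PySem.Int.mod i 3 + bz.1 * 3) 0)) s1) s

-- ===== PORT B =====
-- literal transliteration of Source B: srccol = list(range(9)); for (von, zu) in enumerate(p): if von != zu:
-- for j in range(3): srccol[zu*3+j] = von*3+j; if srccol == list(range(9)): return s.copy();
-- return [s[r*9+srccol[c]] for r in range(9) for c in range(9)]
def mut_blockspalte_alt (s : List Int) (p : List Int) : List Int :=
  let srccol := (PySem.List.enumerate p).foldl (fun t vz =>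
    if vz.1 != vz.2 then
      (PySem.List.pyRange 0 3 1).foldl (fun t j =>
        PySem.List.pySetD t (vz.2 * 3 + j) (vz.1 * 3 + j)) t
    else t) (PySem.List.pyRange 0 9 1)
  if srccol == PySem.List.pyRange 0 9 1 then s else
  (PySem.List.pyRange 0 9 1).flatMap (fun r =>
    (PySem.List.pyRange 0 9 1).map (fun c =>
      PySem.List.pyGetD s (r * 9 + PySem.List.pyGetD srccol c 0) 0))

-- ===== PRECONDITION & SPEC =====
-- Pre_ is the natural domain: either no mapping moves a block column (p[k] = k for all k; any board),
-- or a 9x9 board (81 cells) with at most 3 block-column mappings with values in 0..2.  It excludes some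
-- inputs A still returns on: non-81-cell boards combined with an effective mapping, and negative p
-- entries, where A's value comes from Python's negative-index wraparound (see the claim's cites);
-- elsewhere outside Pre_, A raises IndexError.
def Pre_mut_blockspalte (s : List Int) (p : List Int) : Prop :=
  (∀ k : Nat, k < p.length → p.getD k 0 = (↑k : Int)) ∨
  (s.length = 81 ∧ p.length ≤ 3 ∧ ∀ x ∈ p, 0 ≤ x ∧ x < 3)
instance (s : List Int) (p : List Int) : Decidable (Pre_mut_blockspalte s p) := by
  unfold Pre_mut_blockspalte; infer_instance

def pvWitness_mut_blockspalte : List Int × List Int := (List.replicate 81 (0 : Int), [2, 1, 0])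

def Spec_mut_blockspalte (s : List Int) (p : List Int) (out : List Int) : Prop := out = mut_blockspalte_alt s p
instance (s : List Int) (p : List Int) (out : List Int) : Decidable (Spec_mut_blockspalte s p out) := by unfold Spec_mut_blockspalte; infer_instance

-- ===== CLAIM (what is proved, stated in full; the proofs are below) =====
def Claim_equal_mut_blockspalte : Prop := ∀ (s : List Int) (p : List Int), Dom_mut_blockspalte s p → Pre_mut_blockspalte s p → Spec_mut_blockspalte s p (mut_blockspalte s p)

-- ===== LEMMAS AND PROOFS =====

/-- total get with default 0, Nat index -/
def pvGet (xs : List Int) (n : Nat) : Int := xs.getD n 0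

/-- A's inner 27-write loop, truncated to its first `n` iterations -/
def innA (s : List Int) (von zu : Int) (s1 : List Int) (n : Nat) : List Int :=
  (PySem.List.pyRange 0 (↑n) 1).foldl (fun s1 i =>
    PySem.List.pySetD s1 (PySem.Int.floordiv i 3 * 9 + PySem.Int.mod i 3 + zu * 3)
      (PySem.List.pyGetD s (PySem.Int.floordiv i 3 * 9 + PySem.Int.mod i 3 + von * 3) 0)) s1

/-- B's inner 3-write loop, truncated to its first `n` iterations -/
def innB (von zu : Int) (t : List Int) (n : Nat) : List Int :=
  (PySem.List.pyRange 0 (↑n) 1).foldl (fun t j =>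
    PySem.List.pySetD t (zu * 3 + j) (von * 3 + j)) t

/-- A's outer loop -/
def outA (s : List Int) (e : List (Int × Int)) (s1 : List Int) : List Int :=
  e.foldl (fun s1 bz => if bz.1 == bz.2 then s1 else innA s bz.1 bz.2 s1 27) s1

/-- B's outer loop -/
def outB (e : List (Int × Int)) (t : List Int) : List Int :=
  e.foldl (fun t vz => if vz.1 != vz.2 then innB vz.1 vz.2 t 3 else t) t

lemma A_eq (s p : List Int) : mut_blockspalte s p = outA s (PySem.List.enumerate p) s := rfl

lemma B_eq (s p : List Int) :
    mut_blockspalte_alt s p =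
      (if outB (PySem.List.enumerate p) (PySem.List.pyRange 0 9 1) == PySem.List.pyRange 0 9 1 then s else
      (PySem.List.pyRange 0 9 1).flatMap (fun r =>
        (PySem.List.pyRange 0 9 1).map (fun c =>
          PySem.List.pyGetD s (r * 9 +
            PySem.List.pyGetD (outB (PySem.List.enumerate p) (PySem.List.pyRange 0 9 1)) c 0) 0))) := rfl

lemma skipA (s : List Int) : ∀ (e : List (Int × Int)) (s1 : List Int),
    (∀ w ∈ e, w.1 = w.2) → outA s e s1 = s1 := by
  intro e
  induction e with
  | nil => intro s1 _; rfl
  | cons w e ih =>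
    intro s1 h
    have hw : w.1 = w.2 := h w (List.mem_cons_self ..)
    show outA s e (if w.1 == w.2 then s1 else _) = s1
    rw [if_pos (by simp [hw])]
    exact ih s1 (fun w hw => h w (List.mem_cons_of_mem _ hw))

lemma skipB : ∀ (e : List (Int × Int)) (t : List Int),
    (∀ w ∈ e, w.1 = w.2) → outB e t = t := by
  intro e
  induction e with
  | nil => intro t _; rfl
  | cons w e ih =>
    intro t h
    have hw : w.1 = w.2 := h w (List.mem_cons_self ..)
    show outB e (if w.1 != w.2 then _ else t) = t
    rw [if_neg (by simp [hw])]
    exact ih t (fun w hw => h w (List.mem_cons_of_mem _ hw))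

lemma pvGet_setD (xs : List Int) (i m : Nat) (v : Int) (hi : i < xs.length) :
    pvGet (PySem.List.pySetD xs (↑i) v) m = if m = i then v else pvGet xs m := by
  have h := PySem.List.pyGetD_pySetD_natCast xs i m v 0 hi
  simpa [pvGet, PySem.List.pyGetD_natCast] using h

lemma pvGet_map (l : List Int) (g : Int → Int) (n : Nat) (h : n < l.length) :
    pvGet (l.map g) n = g (pvGet l n) := by
  simp [pvGet, List.getD_eq_getElem?_getD, List.getElem?_map,
    List.getElem?_eq_getElem h]

lemma innA_succ (s : List Int) (von zu : Int) (s1 : List Int) (n : Nat) :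
    innA s von zu s1 (n + 1) =
      PySem.List.pySetD (innA s von zu s1 n) ((↑(n / 3) : Int) * 9 + ↑(n % 3) + zu * 3)
        (PySem.List.pyGetD s ((↑(n / 3) : Int) * 9 + ↑(n % 3) + von * 3) 0) := by
  unfold innA
  rw [show ((↑(n + 1) : Int)) = (↑n : Int) + 1 by push_cast; ring]
  rw [PySem.List.pyRange_one_succ_right (by positivity), List.foldl_append]
  have hf : PySem.Int.floordiv (↑n) 3 = ((↑(n / 3) : Int)) := by
    exact_mod_cast PySem.Int.floordiv_natCast n 3
  have hm : PySem.Int.mod (↑n) 3 = ((↑(n % 3) : Int)) := by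
    exact_mod_cast PySem.Int.mod_natCast n 3
  simp only [List.foldl_cons, List.foldl_nil]
  rw [hf, hm]

lemma innA_len (s : List Int) (von zu : Int) (s1 : List Int) (n : Nat) :
    (innA s von zu s1 n).length = s1.length := by
  induction n with
  | zero => simp [innA]
  | succ n ih => rw [innA_succ, PySem.List.length_pySetD, ih]

lemma innB_succ (von zu : Int) (t : List Int) (n : Nat) :
    innB von zu t (n + 1) =
      PySem.List.pySetD (innB von zu t n) (zu * 3 + ↑n) (von * 3 + ↑n) := by
  unfold innB
  rw [show ((↑(n + 1) : Int)) = (↑n : Int) + 1 by push_cast; ring]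
  rw [PySem.List.pyRange_one_succ_right (by positivity), List.foldl_append]
  simp [List.foldl]

lemma innB_len (von zu : Int) (t : List Int) (n : Nat) :
    (innB von zu t n).length = t.length := by
  induction n with
  | zero => simp [innB]
  | succ n ih => rw [innB_succ, PySem.List.length_pySetD, ih]

lemma innA_get (s s1 : List Int) (v z : Nat) (hz : z < 3) (h81 : s1.length = 81)
    (n : Nat) (hn : n ≤ 27) (m : Nat) (hm : m < 81) :
    pvGet (innA s (↑v) (↑z) s1 n) m =
      if z * 3 ≤ m % 9 ∧ m % 9 < z * 3 + 3 ∧ m / 9 * 3 + (m % 9 - z * 3) < n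
      then pvGet s (m / 9 * 9 + v * 3 + (m % 9 - z * 3))
      else pvGet s1 m := by
  induction n with
  | zero =>
    rw [if_neg (by omega)]
    simp [innA, pvGet]
  | succ n ih =>
    rw [innA_succ]
    rw [show ((↑(n / 3) : Int) * 9 + ↑(n % 3) + (↑z : Int) * 3) = ((↑(n / 3 * 9 + n % 3 + z * 3) : Nat) : Int) by push_cast; ring]
    rw [show ((↑(n / 3) : Int) * 9 + ↑(n % 3) + (↑v : Int) * 3) = ((↑(n / 3 * 9 + n % 3 + v * 3) : Nat) : Int) by push_cast; ring]
    rw [pvGet_setD _ _ _ _ (by rw [innA_len, h81]; omega)]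
    rw [PySem.List.pyGetD_natCast]
    by_cases hEq : m = n / 3 * 9 + n % 3 + z * 3
    · rw [if_pos hEq, if_pos (by omega)]
      show pvGet s _ = pvGet s _
      congr 1
      omega
    · rw [if_neg hEq, ih (by omega)]
      split_ifs with h1 h2 h2 <;> first | rfl | omega

lemma innB_get (t : List Int) (v z : Nat) (hz : z < 3) (h9 : t.length = 9)
    (n : Nat) (hn : n ≤ 3) (c : Nat) (_hc : c < 9) :
    pvGet (innB (↑v) (↑z) t n) c =
      if z * 3 ≤ c ∧ c < z * 3 + n then ((↑(v * 3 + (c - z * 3)) : Nat) : Int)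
      else pvGet t c := by
  induction n with
  | zero =>
    rw [if_neg (by omega)]
    simp [innB, pvGet]
  | succ n ih =>
    rw [innB_succ]
    rw [show ((↑z : Int) * 3 + ↑n) = ((↑(z * 3 + n) : Nat) : Int) by push_cast; ring]
    rw [show ((↑v : Int) * 3 + ↑n) = ((↑(v * 3 + n) : Nat) : Int) by push_cast; ring]
    rw [pvGet_setD _ _ _ _ (by rw [innB_len, h9]; omega)]
    by_cases hEq : c = z * 3 + n
    · rw [if_pos hEq, if_pos (by omega)]
      exact congrArg _ (by omega)
    · rw [if_neg hEq, ih (by omega)]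
      split_ifs with h1 h2 h2 <;> first | rfl | omega

lemma bad_innB (t : List Int) (v z : Nat) (hz : z < 3) (hvz : v ≠ z) (h9 : t.length = 9) :
    ∃ c : Nat, c < 9 ∧ pvGet (innB (↑v) (↑z) t 3) c ≠ (↑c : Int) := by
  refine ⟨z * 3, by omega, ?_⟩
  rw [innB_get t v z hz h9 3 le_rfl (z * 3) (by omega)]
  rw [if_pos (by omega)]
  intro hcon
  have : v * 3 + (z * 3 - z * 3) = z * 3 := by exact_mod_cast hcon
  omega

lemma bad_out : ∀ (e : List (Int × Int)) (t : List Int),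
    (∀ w ∈ e, (0 ≤ w.1 ∧ w.1 < 3) ∧ (0 ≤ w.2 ∧ w.2 < 3)) → t.length = 9 →
    ((∃ c : Nat, c < 9 ∧ pvGet t c ≠ (↑c : Int)) ∨ ∃ w ∈ e, w.1 ≠ w.2) →
    ∃ c : Nat, c < 9 ∧ pvGet (outB e t) c ≠ (↑c : Int) := by
  intro e
  induction e with
  | nil =>
    intro t _ _ h
    rcases h with h | ⟨w, hw, _⟩
    · exact h
    · cases hw
  | cons w e ih =>
    intro t hb h9 h
    rcases w with ⟨a, b⟩
    have hbw := hb (a, b) (List.mem_cons_self ..)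
    have hbtl : ∀ w ∈ e, (0 ≤ w.1 ∧ w.1 < 3) ∧ (0 ≤ w.2 ∧ w.2 < 3) :=
      fun w hw => hb w (List.mem_cons_of_mem _ hw)
    by_cases hab : a = b
    · have he : outB ((a, b) :: e) t = outB e t := by
        simp [outB, List.foldl_cons, hab]
      rw [he]
      refine ih t hbtl h9 ?_
      rcases h with h | ⟨w, hw, hne⟩
      · exact Or.inl h
      · rcases List.mem_cons.mp hw with rfl | hw
        · exact absurd hab hne
        · exact Or.inr ⟨w, hw, hne⟩
    · have he : outB ((a, b) :: e) t = outB e (innB a b t 3) := by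
        simp [outB, List.foldl_cons, hab]
      rw [he]
      obtain ⟨v, rfl⟩ : ∃ v : Nat, a = (↑v : Int) := ⟨a.toNat, by omega⟩
      obtain ⟨z, rfl⟩ : ∃ z : Nat, b = (↑z : Int) := ⟨b.toNat, by omega⟩
      refine ih (innB (↑v) (↑z) t 3) hbtl (by rw [innB_len, h9]) ?_
      exact Or.inl (bad_innB t v z (by omega) (fun h => hab (by exact_mod_cast h)) h9)

/-- the simulation relation: the mutated board equals the table-rendered board -/
def pvRel (s t s1 : List Int) : Prop :=
  ∀ m : Nat, m < 81 →
    pvGet s1 m = PySem.List.pyGetD s ((↑(m / 9 * 9) : Int) + pvGet t (m % 9)) 0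

lemma step_pvRel (s t s1 : List Int) (v z : Nat) (hz : z < 3)
    (h9 : t.length = 9) (h81 : s1.length = 81) (hrel : pvRel s t s1) :
    pvRel s (innB (↑v) (↑z) t 3) (innA s (↑v) (↑z) s1 27) := by
  intro m hm
  rw [innA_get s s1 v z hz h81 27 le_rfl m hm]
  rw [innB_get t v z hz h9 3 le_rfl (m % 9) (by omega)]
  split_ifs with h1 h2 h2 <;> try omega
  · rw [show ((↑(m / 9 * 9) : Int) + (↑(v * 3 + (m % 9 - z * 3)) : Int)) = ((↑(m / 9 * 9 + v * 3 + (m % 9 - z * 3)) : Nat) : Int) by push_cast; ring]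
    rw [PySem.List.pyGetD_natCast]
    rfl
  · exact hrel m hm

lemma out_pvRel (s : List Int) : ∀ (e : List (Int × Int)) (t s1 : List Int),
    (∀ w ∈ e, (0 ≤ w.1 ∧ w.1 < 3) ∧ (0 ≤ w.2 ∧ w.2 < 3)) →
    t.length = 9 → s1.length = 81 → pvRel s t s1 →
    (outA s e s1).length = 81 ∧ (outB e t).length = 9 ∧ pvRel s (outB e t) (outA s e s1) := by
  intro e
  induction e with
  | nil => intro t s1 _ h9 h81 hrel; exact ⟨h81, h9, hrel⟩
  | cons w e ih =>
    intro t s1 hb h9 h81 hrel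
    rcases w with ⟨a, b⟩
    have hw := hb (a, b) (List.mem_cons_self ..)
    obtain ⟨⟨ha0, ha3⟩, ⟨hb0, hb3⟩⟩ := hw
    have hbtl : ∀ w ∈ e, (0 ≤ w.1 ∧ w.1 < 3) ∧ (0 ≤ w.2 ∧ w.2 < 3) :=
      fun w hw => hb w (List.mem_cons_of_mem _ hw)
    by_cases hab : a = b
    · have h1 : outA s ((a, b) :: e) s1 = outA s e s1 := by
        simp [outA, List.foldl_cons, hab]
      have h2 : outB ((a, b) :: e) t = outB e t := by
        simp [outB, List.foldl_cons, hab]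
      rw [h1, h2]
      exact ih t s1 hbtl h9 h81 hrel
    · have h1 : outA s ((a, b) :: e) s1 = outA s e (innA s a b s1 27) := by
        simp [outA, List.foldl_cons, hab]
      have h2 : outB ((a, b) :: e) t = outB e (innB a b t 3) := by
        simp [outB, List.foldl_cons, hab]
      rw [h1, h2]
      obtain ⟨v, rfl⟩ : ∃ v : Nat, a = (↑v : Int) := ⟨a.toNat, by omega⟩
      obtain ⟨z, rfl⟩ : ∃ z : Nat, b = (↑z : Int) := ⟨b.toNat, by omega⟩
      exact ih (innB (↑v) (↑z) t 3) (innA s (↑v) (↑z) s1 27) hbtl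
        (by rw [innB_len, h9]) (by rw [innA_len, h81])
        (step_pvRel s t s1 v z (by omega) h9 h81 hrel)

lemma range9_get (c : Nat) (hc : c < 9) : pvGet (PySem.List.pyRange 0 9 1) c = (↑c : Int) := by
  interval_cases c <;> decide

lemma flatMap_get9 (f : Int → List Int) : ∀ (l : List Int) (k : Nat),
    (∀ a ∈ l, (f a).length = 9) → k < 9 * l.length →
    pvGet (l.flatMap f) k = pvGet (f (pvGet l (k / 9))) (k % 9) := by
  intro l
  induction l with
  | nil => intro k _ hk; simp at hk
  | cons a l ih =>
    intro k hf hk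
    rw [List.length_cons] at hk
    rw [List.flatMap_cons]
    by_cases h9 : k < 9
    · rw [pvGet, List.getD_append _ _ _ k (by rw [hf a (List.mem_cons_self ..)]; omega)]
      rw [show k / 9 = 0 by omega, show k % 9 = k by omega]
      rfl
    · rw [pvGet, List.getD_append_right _ _ _ k (by rw [hf a (List.mem_cons_self ..)]; omega)]
      rw [hf a (List.mem_cons_self ..)]
      have := ih (k - 9) (fun a ha => hf a (List.mem_cons_of_mem _ ha)) (by omega)
      rw [pvGet] at this
      rw [this]
      rw [show k / 9 = (k - 9) / 9 + 1 by omega, show (k - 9) % 9 = k % 9 by omega]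
      rfl

lemma length_inner (s T : List Int) (r : Int) :
    ((PySem.List.pyRange 0 9 1).map (fun c =>
      PySem.List.pyGetD s (r * 9 + PySem.List.pyGetD T c 0) 0)).length = 9 := by
  rw [List.length_map]
  decide

-- ===== VERDICT (by name: the statement is the Claim_ definition above) =====
theorem mut_blockspalte_spec : Claim_equal_mut_blockspalte := by
  intro s p _hdom hpre
  unfold Spec_mut_blockspalte
  by_cases hallid : ∀ w ∈ PySem.List.enumerate p, w.1 = w.2
  · -- no mapping moves anything: both sides return the board unchanged
    rw [A_eq, B_eq, skipA s _ s hallid, skipB _ _ hallid, if_pos (by simp)]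
  · rcases hpre with hid | ⟨h81, hp3, hpm⟩
    · exfalso
      apply hallid
      intro w hw
      rw [PySem.List.mem_enumerate_iff] at hw
      obtain ⟨k, hk, rfl⟩ := hw
      have := hid k hk
      rw [List.getD_eq_getElem _ _ hk] at this
      simp [this]
    · have hbounds : ∀ w ∈ PySem.List.enumerate p, (0 ≤ w.1 ∧ w.1 < 3) ∧ (0 ≤ w.2 ∧ w.2 < 3) := by
        intro w hw
        rw [PySem.List.mem_enumerate_iff] at hw
        obtain ⟨k, hk, rfl⟩ := hw
        have hk3 : k < 3 := by omega
        have hmem := hpm p[k] (List.getElem_mem hk)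
        exact ⟨⟨by simp, by simp; omega⟩, hmem⟩
      have heff : ∃ w ∈ PySem.List.enumerate p, w.1 ≠ w.2 := by
        push Not at hallid
        exact hallid
      have hbad := bad_out (PySem.List.enumerate p) (PySem.List.pyRange 0 9 1) hbounds
        (by decide) (Or.inr heff)
      have hne : (outB (PySem.List.enumerate p) (PySem.List.pyRange 0 9 1) ==
          PySem.List.pyRange 0 9 1) = false := by
        rw [beq_eq_false_iff_ne]
        intro hEq
        obtain ⟨c, hc, hbadc⟩ := hbad
        rw [hEq, range9_get c hc] at hbadc
        exact hbadc rfl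
      rw [A_eq, B_eq, hne, if_neg (by simp)]
      have hbase : pvRel s (PySem.List.pyRange 0 9 1) s := by
        intro m hm
        rw [range9_get (m % 9) (by omega)]
        rw [show ((↑(m / 9 * 9) : Int) + (↑(m % 9) : Int)) = ((↑m : Nat) : Int) by push_cast; omega]
        rw [PySem.List.pyGetD_natCast]
        rfl
      obtain ⟨hA81, _hT9, hrel⟩ := out_pvRel s (PySem.List.enumerate p) (PySem.List.pyRange 0 9 1) s
        hbounds (by decide) h81 hbase
      apply List.ext_getElem
      · rw [hA81, List.length_flatMap]
        simp only [length_inner]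
        decide
      · intro k hk1 _hk2
        rw [hA81] at hk1
        rw [← List.getD_eq_getElem _ 0, ← List.getD_eq_getElem _ 0]
        show pvGet _ k = pvGet _ k
        rw [flatMap_get9 _ _ k (fun a _ => length_inner s _ a) (by rw [show (PySem.List.pyRange 0 9 1).length = 9 from by decide]; omega)]
        rw [range9_get (k / 9) (by omega)]
        rw [pvGet_map _ _ (k % 9) (by rw [show (PySem.List.pyRange 0 9 1).length = 9 from by decide]; omega)]
        rw [range9_get (k % 9) (by omega)]
        rw [hrel k hk1]
        rw [PySem.List.pyGetD_natCast]
        rw [show ((↑(k / 9) : Int) * 9) = ((↑(k / 9 * 9) : Nat) : Int) by push_cast; ring]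
        rfl
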